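-- pv_equiv track=rewrite | github.com/amyth/hammer | lib/hammerlib.py | abbrmatch
-- ===== SOURCE A (Python) =====
-- def levenshtein_distance(x1, x2):
--     """
--     Finds a match between mis-spelt string based on the lavenhtein
--     distance formula
--     """
--
--     if len(x1) > len(x2):
--         x1, x2 = x2, x1
--
--     distances = range(len(x1) + 1)
--     for i2, c2 in enumerate(x2):
--         distances_ = [i2+1]
--         for i1, c1 in enumerate(x1):
--             if c1 == c2:
--                 distances_.append(distances[i1])
--             else:
--                 distances_.append(1 + min((distances[i1],
--                     distances[i1 + 1], distances_[-1])))
--         distances = distances_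
--     return distances[-1]
--
-- def abbrmatch(x, y):
--     """
--     Returns the match percentage between two strings assuming one of
--     the strings is the abbreviation for the other.
--     """
--
--     sl = ['-', '&', ',', ', ', ' - ', ';', '; ', '/', '/ ', ' / ']
--
--     if len(x) > len(y):
--         x, y = y, x
--
--     for n in sl:
--         x = x.replace(n, ' ')
--         y = y.replace(n, ' ')
--
--     xl = [n.lower().strip() for n in x.split()]
--     yl = [n.lower().strip() for n in y.split()]
--
--     ps = []
--     for i, n in enumerate(xl[0]):
--         ps.append(levenshtein_distance(n, ''.join([z[0] for z in yl])))
--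
--     return ps
-- ===== SOURCE B (Python) =====
-- def abbrmatch(x, y):
--     """
--     Returns the match percentage between two strings assuming one of
--     the strings is the abbreviation for the other.
--     """
--     if len(x) > len(y):
--         x, y = y, x
--
--     seps = set('-&,;/')
--     xt = ''.join(' ' if c in seps else c for c in x)
--     yt = ''.join(' ' if c in seps else c for c in y)
--
--     xwords = xt.split()
--     ywords = yt.split()
--
--     first = xwords[0].lower()
--     abbr = {w[0].lower() for w in ywords}
--     m = len(ywords)
--
--     return [m - 1 if c in abbr else max(m, 1) for c in first]
-- ===== Notes on version B (the rewrite author's own statement) =====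
-- stated objective: faster
-- what changed: Instead of running a full Levenshtein DP between each character of the first word and the abbreviation string, B precomputes the set of first letters of y's words once and uses the closed form of the distance of a single character to a string (m-1 if the character occurs in it, else max(m,1)).
import Mathlib
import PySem

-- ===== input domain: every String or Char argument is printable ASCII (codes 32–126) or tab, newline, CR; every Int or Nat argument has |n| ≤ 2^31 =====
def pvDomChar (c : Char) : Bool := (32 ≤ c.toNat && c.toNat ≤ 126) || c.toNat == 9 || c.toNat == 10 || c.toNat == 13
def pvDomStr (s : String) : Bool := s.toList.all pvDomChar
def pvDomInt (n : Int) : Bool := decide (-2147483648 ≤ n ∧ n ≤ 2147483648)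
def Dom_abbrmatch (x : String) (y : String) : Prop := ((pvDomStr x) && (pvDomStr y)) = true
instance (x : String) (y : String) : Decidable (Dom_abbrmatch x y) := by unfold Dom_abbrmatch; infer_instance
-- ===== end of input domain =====

-- B replaces A's per-character Levenshtein DP against the abbreviation string by the closed form
-- of that distance (m-1 if the character occurs among the first letters, else max(m,1)),
-- with the first letters collected once into a set.  Objective: faster (O(k+m) instead of O(k*m)).

-- ===== PORT A =====
-- inner loop of levenshtein_distance: 'for i1, c1 in enumerate(x1): ...' building distances_
def levInner (distances : List Int) (c2 : Char) : List Char → Nat → List Int → List Int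
  | [], _, acc => acc
  | c1 :: rest, i1, acc =>
      levInner distances c2 rest (i1 + 1)
        (acc ++ [if c1 == c2 then distances.getD i1 0
                 else 1 + min (min (distances.getD i1 0) (distances.getD (i1 + 1) 0))
                         (acc.getLast?.getD 0)])

-- outer loop: 'for i2, c2 in enumerate(x2): ...'
def levOuter (x1 : List Char) : List Char → Nat → List Int → List Int
  | [], _, distances => distances
  | c2 :: rest, i2, distances =>
      levOuter x1 rest (i2 + 1) (levInner distances c2 x1 0 [(i2 : Int) + 1])

def levenshteinDistance (a1 : List Char) (a2 : List Char) : Int :=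
  let p := if a1.length > a2.length then (a2, a1) else (a1, a2)
  let distances : List Int := (List.range (p.1.length + 1)).map (Int.ofNat)
  ((levOuter p.1 p.2 0 distances).getLast?).getD 0

def abbrmatch (x : String) (y : String) : List Int :=
  let sl : List (List Char) :=
    [['-'], ['&'], [','], [',', ' '], [' ', '-', ' '], [';'], [';', ' '],
     ['/'], ['/', ' '], [' ', '/', ' ']]
  let p := if x.toList.length > y.toList.length then (y.toList, x.toList) else (x.toList, y.toList)
  let xc := sl.foldl (fun s n => PySem.Chars.replace s n [' ']) p.1
  let yc := sl.foldl (fun s n => PySem.Chars.replace s n [' ']) p.2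
  let xl := (PySem.Chars.split₀ xc).map (fun n => PySem.Chars.strip (PySem.Chars.lower n))
  let yl := (PySem.Chars.split₀ yc).map (fun n => PySem.Chars.strip (PySem.Chars.lower n))
  -- 'xl[0]' raises IndexError when xl is empty: those inputs are excluded by Pre_abbrmatch
  (xl.getD 0 []).map (fun n =>
    levenshteinDistance [n] (PySem.Chars.join [] (yl.map (fun z => [z.getD 0 ' ']))))

-- ===== PORT B =====
def abbrSeps : List Char := ['-', '&', ',', ';', '/']

def abbrmatch_alt (x : String) (y : String) : List Int :=
  let p := if PySem.Str.len x > PySem.Str.len y then (y.toList, x.toList) else (x.toList, y.toList)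
  let xt := p.1.map (fun c => if abbrSeps.contains c then ' ' else c)
  let yt := p.2.map (fun c => if abbrSeps.contains c then ' ' else c)
  let xwords := PySem.Chars.split₀ xt
  let ywords := PySem.Chars.split₀ yt
  -- 'xwords[0]' raises IndexError when xwords is empty: excluded by Pre_abbrmatch
  let first := PySem.Chars.lower (xwords.getD 0 [])
  let abbr : PySem.Set Char :=
    PySem.Set.ofList (ywords.map (fun w => PySem.Chars.lowerChar (w.getD 0 ' ')))
  let m : Int := ywords.length
  first.map (fun c => if abbr.contains c then m - 1 else max m 1)

-- ===== PRECONDITION & SPEC =====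
-- Pre_ excludes exactly the inputs where Python A raises IndexError at 'xl[0]': the shorter
-- string (x on ties) consists solely of whitespace and the separator characters '-&,;/'.
def Pre_abbrmatch (x : String) (y : String) : Prop :=
  ((if x.toList.length > y.toList.length then y else x).toList.any
    (fun c => !(PySem.Chars.isspace c) && !(abbrSeps.contains c))) = true
instance (x : String) (y : String) : Decidable (Pre_abbrmatch x y) := by unfold Pre_abbrmatch; infer_instance

def pvWitness_abbrmatch : String × String := ("ab", "a b")

def Spec_abbrmatch (x : String) (y : String) (out : List Int) : Prop := out = abbrmatch_alt x y
instance (x : String) (y : String) (out : List Int) : Decidable (Spec_abbrmatch x y out) := by unfold Spec_abbrmatch; infer_instance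

-- ===== CLAIM (what is proved, stated in full; the proofs are below) =====
def Claim_equal_abbrmatch : Prop := ∀ (x : String) (y : String), Dom_abbrmatch x y → Pre_abbrmatch x y → Spec_abbrmatch x y (abbrmatch x y)

-- ===== LEMMAS AND PROOFS =====
theorem replace_go_single (a b : Char) :
    ∀ (fuel : Nat) (s acc : List Char), s.length ≤ fuel →
      PySem.Chars.replace.go [a] [b] fuel s acc
        = acc.reverse ++ s.map (fun c => if c = a then b else c) := by
  intro fuel
  induction fuel with
  | zero =>
    intro s acc h
    have : s = [] := List.eq_nil_of_length_eq_zero (Nat.le_zero.mp h)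
    subst this; simp [PySem.Chars.replace.go]
  | succ n ih =>
    intro s acc h
    cases s with
    | nil => simp [PySem.Chars.replace.go]
    | cons c t =>
      simp only [PySem.Chars.replace.go]
      by_cases hc : c = a
      · subst hc
        have : [c].isPrefixOf (c :: t) = true := by simp [List.isPrefixOf]
        simp [this, ih t _ (by simpa using h)]
      · have : [a].isPrefixOf (c :: t) = false := by simp [List.isPrefixOf]; exact fun he => (hc he.symm).elim
        simp [this, ih t _ (by simpa using h), hc]

theorem replace_single (a b : Char) (s : List Char) :
    PySem.Chars.replace s [a] [b] = s.map (fun c => if c = a then b else c) := by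
  simp [PySem.Chars.replace, replace_go_single a b s.length s [] le_rfl]

theorem replace_go_absent (old new : List Char) (a : Char) (ha : a ∈ old) :
    ∀ (fuel : Nat) (s acc : List Char), s.length ≤ fuel → a ∉ s →
      PySem.Chars.replace.go old new fuel s acc = acc.reverse ++ s := by
  intro fuel
  induction fuel with
  | zero =>
    intro s acc h _
    have : s = [] := List.eq_nil_of_length_eq_zero (Nat.le_zero.mp h)
    subst this; simp [PySem.Chars.replace.go]
  | succ n ih =>
    intro s acc h hns
    cases s with
    | nil => simp [PySem.Chars.replace.go]
    | cons c t =>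
      have hpre : old.isPrefixOf (c :: t) = false := by
        by_contra hp
        have : old <+: (c :: t) := List.isPrefixOf_iff_prefix.mp (by simpa using hp)
        exact hns (this.subset ha)
      simp only [PySem.Chars.replace.go, hpre]
      rw [ih t (c :: acc) (by simpa using h) (fun hm => hns (List.mem_cons_of_mem _ hm))]
      simp

theorem replace_absent (old new : List Char) (a : Char) (ha : a ∈ old) (s : List Char)
    (hs : a ∉ s) : PySem.Chars.replace s old new = s := by
  have hne : old.isEmpty = false := by cases old with | nil => cases ha | cons h t => rfl
  simp [PySem.Chars.replace, hne, replace_go_absent old new a ha s.length s [] le_rfl hs]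



theorem not_mem_map (a : Char) (f : Char → Char) (hf : ∀ c, f c ≠ a) (s : List Char) :
    a ∉ s.map f := by
  intro hm
  obtain ⟨d, _, hd⟩ := List.mem_map.mp hm
  exact hf d hd

set_option maxHeartbeats 1000000 in
theorem transform_eq (s : List Char) :
    [['-'], ['&'], [','], [',', ' '], [' ', '-', ' '], [';'], [';', ' '],
     ['/'], ['/', ' '], [' ', '/', ' ']].foldl (fun s n => PySem.Chars.replace s n [' ']) s
      = s.map (fun c => if abbrSeps.contains c then ' ' else c) := by
  simp only [List.foldl_cons, List.foldl_nil]
  simp only [replace_single, List.map_map]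
  set f3 : Char → Char := (fun c => if c = ',' then ' ' else c) ∘
    ((fun c => if c = '&' then ' ' else c) ∘ (fun c => if c = '-' then ' ' else c)) with hf3
  have hcomma : (',' : Char) ∉ s.map f3 := by
    apply not_mem_map
    intro c
    simp only [hf3, Function.comp]
    by_cases h1 : c = '-' <;> by_cases h2 : c = '&' <;> by_cases h3 : c = ',' <;> simp_all
  have hdash : ('-' : Char) ∉ s.map f3 := by
    apply not_mem_map
    intro c
    simp only [hf3, Function.comp]
    by_cases h1 : c = '-' <;> by_cases h2 : c = '&' <;> by_cases h3 : c = ',' <;> simp_all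
  rw [replace_absent [',', ' '] [' '] ',' (by decide) _ hcomma,
      replace_absent [' ', '-', ' '] [' '] '-' (by decide) _ hdash]
  simp only [List.map_map]
  set f4 : Char → Char := (fun c => if c = ';' then ' ' else c) ∘ f3 with hf4
  have hsemi : (';' : Char) ∉ s.map f4 := by
    apply not_mem_map
    intro c
    simp only [hf4, hf3, Function.comp]
    by_cases h1 : c = '-' <;> by_cases h2 : c = '&' <;> by_cases h3 : c = ',' <;>
      by_cases h4 : c = ';' <;> simp_all
  rw [replace_absent [';', ' '] [' '] ';' (by decide) _ hsemi]
  simp only [List.map_map]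
  set f5 : Char → Char := (fun c => if c = '/' then ' ' else c) ∘ f4 with hf5
  have hslash : ('/' : Char) ∉ s.map f5 := by
    apply not_mem_map
    intro c
    simp only [hf5, hf4, hf3, Function.comp]
    by_cases h1 : c = '-' <;> by_cases h2 : c = '&' <;> by_cases h3 : c = ',' <;>
      by_cases h4 : c = ';' <;> by_cases h5 : c = '/' <;> simp_all
  rw [replace_absent ['/', ' '] [' '] '/' (by decide) _ hslash,
      replace_absent [' ', '/', ' '] [' '] '/' (by decide) _ hslash]
  apply List.map_congr_left
  intro c hc
  simp only [hf5, hf4, hf3, Function.comp]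
  by_cases h1 : c = '-' <;> by_cases h2 : c = '&' <;> by_cases h3 : c = ',' <;>
    by_cases h4 : c = ';' <;> by_cases h5 : c = '/' <;>
    simp [abbrSeps, h1, h2, h3, h4, h5]

theorem split₀_go_words :
    ∀ (s cur : List Char) (acc : List (List Char)),
      (∀ c ∈ cur, PySem.Chars.isspace c = false) →
      (∀ w ∈ acc, w ≠ [] ∧ ∀ c ∈ w, PySem.Chars.isspace c = false) →
      ∀ w ∈ PySem.Chars.split₀.go s cur acc, w ≠ [] ∧ ∀ c ∈ w, PySem.Chars.isspace c = false := by
  intro s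
  induction s with
  | nil =>
    intro cur acc hcur hacc w hw
    by_cases h : cur.isEmpty
    · simp [PySem.Chars.split₀.go, h] at hw
      exact hacc w hw
    · simp [PySem.Chars.split₀.go, h] at hw
      rcases hw with h1 | h1
      · exact hacc w h1
      · subst h1
        refine ⟨by simpa [List.isEmpty_iff] using h, ?_⟩
        intro c hc; exact hcur c (List.mem_reverse.mp hc)
  | cons c rest ih =>
    intro cur acc hcur hacc w hw
    by_cases hsp : PySem.Chars.isspace c
    · by_cases h : cur.isEmpty
      · simp only [PySem.Chars.split₀.go, hsp, h, if_true] at hw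
        exact ih [] acc (by simp) hacc w hw
      · simp only [PySem.Chars.split₀.go, hsp, h, if_true, if_false, Bool.false_eq_true] at hw
        refine ih [] (cur.reverse :: acc) (by simp) ?_ w hw
        intro v hv
        rcases List.mem_cons.mp hv with hv | hv
        · subst hv
          refine ⟨by simpa [List.isEmpty_iff] using h, ?_⟩
          intro d hd; exact hcur d (List.mem_reverse.mp hd)
        · exact hacc v hv
    · simp only [PySem.Chars.split₀.go, hsp, Bool.false_eq_true, if_false] at hw
      refine ih (c :: cur) acc ?_ hacc w hw
      intro d hd
      rcases List.mem_cons.mp hd with hd | hd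
      · subst hd; simpa using hsp
      · exact hcur d hd

theorem split₀_words (s : List Char) :
    ∀ w ∈ PySem.Chars.split₀ s, w ≠ [] ∧ ∀ c ∈ w, PySem.Chars.isspace c = false :=
  split₀_go_words s [] [] (by simp) (by simp)

theorem dropWhile_all_false (p : Char → Bool) (l : List Char)
    (h : ∀ c ∈ l, p c = false) : l.dropWhile p = l := by
  cases l with
  | nil => rfl
  | cons a t => simp [h a (List.mem_cons_self)]

theorem strip_id (w : List Char) (h : ∀ c ∈ w, PySem.Chars.isspace c = false) :
    PySem.Chars.strip w = w := by
  have h1 : PySem.Chars.lstrip w = w := by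
    simp [PySem.Chars.lstrip, dropWhile_all_false _ w h]
  have h2 : PySem.Chars.rstrip w = w := by
    simp [PySem.Chars.rstrip,
      dropWhile_all_false _ w.reverse (fun c hc => h c (List.mem_reverse.mp hc))]
  simp [PySem.Chars.strip, h1, h2]

theorem isspace_lowerChar (c : Char) (h : PySem.Chars.isspace c = false) :
    PySem.Chars.isspace (PySem.Chars.lowerChar c) = false := by
  unfold PySem.Chars.lowerChar
  by_cases hu : PySem.Chars.isupper c
  · simp only [hu, if_true]
    unfold PySem.Chars.isupper at hu
    have hc : 65 ≤ c.toNat ∧ c.toNat ≤ 90 := by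
      simpa [Char.le_def] using hu
    have hv : Nat.isValidChar (c.toNat + 32) := Or.inl (by omega)
    have ht : (Char.ofNat (c.toNat + 32)).toNat = c.toNat + 32 := by
      rw [Char.toNat, Char.val_ofNat hv]
      simp
      omega
    unfold PySem.Chars.isspace
    simp only [ht, Bool.or_eq_false_iff, Bool.and_eq_false_iff, decide_eq_false_iff_not]
    omega
  · simpa [hu] using h
theorem levOuter_single (c : Char) :
    ∀ (s : List Char) (k : Nat) (b : Bool),
      ((levOuter [c] s k [(k : Int), if b then (k : Int) - 1 else max (k : Int) 1]).getLast?).getD 0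
        = if b || s.contains c then ((k : Int) + s.length) - 1 else max ((k : Int) + s.length) 1 := by
  intro s
  induction s with
  | nil =>
    intro k b
    cases b <;> simp [levOuter]
  | cons c2 rest ih =>
    intro k b
    have hunf : levOuter [c] (c2 :: rest) k [(k : Int), if b then (k : Int) - 1 else max (k : Int) 1]
        = levOuter [c] rest (k + 1)
            (levInner [(k : Int), if b then (k : Int) - 1 else max (k : Int) 1] c2 [c] 0 [(k : Int) + 1]) := rfl
    have hinner : levInner [(k : Int), if b then (k : Int) - 1 else max (k : Int) 1] c2 [c] 0 [(k : Int) + 1]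
        = [(k : Int) + 1, if c == c2 then (k : Int)
            else 1 + min (min (k : Int) (if b then (k : Int) - 1 else max (k : Int) 1)) ((k : Int) + 1)] := by
      simp [levInner, List.getD]
    have hval : [(k : Int) + 1, if c == c2 then (k : Int)
            else 1 + min (min (k : Int) (if b then (k : Int) - 1 else max (k : Int) 1)) ((k : Int) + 1)]
        = [((k + 1 : Nat) : Int), if (b || (c == c2)) then ((k + 1 : Nat) : Int) - 1
            else max ((k + 1 : Nat) : Int) 1] := by
      have hc1 : ((k + 1 : Nat) : Int) = (k : Int) + 1 := by push_cast; ring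
      rw [hc1]
      refine List.cons_eq_cons.mpr ⟨rfl, List.cons_eq_cons.mpr ⟨?_, rfl⟩⟩
      cases hb : b <;> by_cases hcc : c = c2 <;> simp [hcc] <;> omega
    rw [hunf, hinner, hval, ih (k + 1) (b || (c == c2))]
    have hcont : (c2 :: rest).contains c = ((c == c2) || rest.contains c) := by
      by_cases h : c = c2
      · simp [h]
      · have h1 : (c2 == c) = false := beq_eq_false_iff_ne.mpr (fun he => h he.symm)
        have h2 : (c == c2) = false := beq_eq_false_iff_ne.mpr h
        simp [h2]
        exact fun he => absurd he h
    have harith : ((k + 1 : Nat) : Int) + (rest.length : Int) = (k : Int) + ((c2 :: rest).length : Int) := by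
      simp only [List.length_cons]; push_cast; ring
    rw [hcont, ← Bool.or_assoc, harith]

theorem lev_single (c : Char) (s : List Char) :
    levenshteinDistance [c] s
      = if s.contains c then (s.length : Int) - 1 else max (s.length : Int) 1 := by
  cases s with
  | nil => simp [levenshteinDistance, levOuter, levInner]
  | cons a t =>
    have hlen : ¬ ([c].length > (a :: t).length) := by simp
    have hinit : (List.range ([c].length + 1)).map Int.ofNat
        = [((0 : Nat) : Int), if false then ((0 : Nat) : Int) - 1 else max ((0 : Nat) : Int) 1] := by
      simp [List.range_succ]
    have h := levOuter_single c (a :: t) 0 false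
    simp only [levenshteinDistance, hlen, if_false, hinit]
    rw [h]
    norm_num
theorem core_eq (u v : List Char) :
    (((PySem.Chars.split₀
        ([['-'], ['&'], [','], [',', ' '], [' ', '-', ' '], [';'], [';', ' '],
          ['/'], ['/', ' '], [' ', '/', ' ']].foldl (fun s n => PySem.Chars.replace s n [' ']) u)).map
        (fun n => PySem.Chars.strip (PySem.Chars.lower n))).getD 0 []).map (fun n =>
      levenshteinDistance [n]
        (PySem.Chars.join []
          (((PySem.Chars.split₀
              ([['-'], ['&'], [','], [',', ' '], [' ', '-', ' '], [';'], [';', ' '],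
                ['/'], ['/', ' '], [' ', '/', ' ']].foldl (fun s n => PySem.Chars.replace s n [' ']) v)).map
              (fun n => PySem.Chars.strip (PySem.Chars.lower n))).map (fun z => [z.getD 0 ' ']))))
    =
    (PySem.Chars.lower
        ((PySem.Chars.split₀ (u.map (fun c => if abbrSeps.contains c then ' ' else c))).getD 0 [])).map
      (fun c =>
        if (PySem.Set.ofList
            ((PySem.Chars.split₀ (v.map (fun c => if abbrSeps.contains c then ' ' else c))).map
              (fun w => PySem.Chars.lowerChar (w.getD 0 ' ')))).contains c
        then ((PySem.Chars.split₀ (v.map (fun c => if abbrSeps.contains c then ' ' else c))).length : Int) - 1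
        else max ((PySem.Chars.split₀ (v.map (fun c => if abbrSeps.contains c then ' ' else c))).length : Int) 1) := by
  rw [transform_eq, transform_eq]
  set xw := PySem.Chars.split₀ (u.map (fun c => if abbrSeps.contains c then ' ' else c)) with hxw
  set yw := PySem.Chars.split₀ (v.map (fun c => if abbrSeps.contains c then ' ' else c)) with hyw
  -- strip ∘ lower = lower on split words
  have hmap : ∀ (zw : List (List Char)), zw = xw ∨ zw = yw →
      zw.map (fun n => PySem.Chars.strip (PySem.Chars.lower n)) = zw.map PySem.Chars.lower := by
    intro zw hz
    apply List.map_congr_left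
    intro w hw
    apply strip_id
    intro c hc
    obtain ⟨d, hd, hdc⟩ := List.mem_map.mp hc
    have hns : PySem.Chars.isspace d = false := by
      rcases hz with h | h <;> subst h
      · exact (split₀_words _ w hw).2 d hd
      · exact (split₀_words _ w hw).2 d hd
    subst hdc
    exact isspace_lowerChar d hns
  rw [hmap xw (Or.inl rfl), hmap yw (Or.inr rfl)]
  -- first word
  have hfirst : (xw.map PySem.Chars.lower).getD 0 [] = PySem.Chars.lower (xw.getD 0 []) := by
    cases xw <;> simp [PySem.Chars.lower]
  rw [hfirst]
  -- the abbreviation string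
  have habbr : PySem.Chars.join [] ((yw.map PySem.Chars.lower).map (fun z => [z.getD 0 ' ']))
      = yw.map (fun w => PySem.Chars.lowerChar (w.getD 0 ' ')) := by
    rw [List.map_map]
    have : (yw.map ((fun z : List Char => [z.getD 0 ' ']) ∘ PySem.Chars.lower))
        = (yw.map (fun w => PySem.Chars.lowerChar (w.getD 0 ' '))).map (fun d => [d]) := by
      rw [List.map_map]
      apply List.map_congr_left
      intro w hw
      have hne := (split₀_words _ w hw).1
      cases w with
      | nil => exact absurd rfl hne
      | cons a t => simp [Function.comp, PySem.Chars.lower]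
    rw [this, PySem.Chars.join_nil_singletons]
  rw [habbr]
  -- pointwise closed form
  apply List.map_congr_left
  intro c _
  rw [lev_single]
  have hm : ((yw.map (fun w => PySem.Chars.lowerChar (w.getD 0 ' '))).length : Int) = (yw.length : Int) := by
    simp
  rw [hm]
  have hcont : (yw.map (fun w => PySem.Chars.lowerChar (w.getD 0 ' '))).contains c
      = (PySem.Set.ofList (yw.map (fun w => PySem.Chars.lowerChar (w.getD 0 ' ')))).contains c := by
    simp [PySem.Set.mem_ofList]
  rw [hcont]

-- ===== VERDICT (by name: the statement is the Claim_ definition above) =====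
theorem abbrmatch_spec : Claim_equal_abbrmatch := by
  intro x y _ _
  unfold Spec_abbrmatch abbrmatch abbrmatch_alt
  have hlen : PySem.Str.len x > PySem.Str.len y ↔ x.toList.length > y.toList.length := by
    simp [PySem.Str.len]
  by_cases h : x.toList.length > y.toList.length
  · simp only [if_pos h, if_pos (hlen.mpr h)]
    exact core_eq y.toList x.toList
  · simp only [if_neg h, if_neg (fun hc => h (hlen.mp hc))]
    exact core_eq x.toList y.toList
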